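-- pv_equiv track=rewrite | github.com/kxiao1/leetcode | hackerrank/citadel_23.py | textQueries
-- ===== SOURCE A (Python) =====
-- def textQueries(sentences, queries):
--     # freqs maps words to sentences to counts
--
--     freqs = dict()
--     for (i, sentence) in enumerate(sentences):
--         for word in sentence.split():
--             if word not in freqs:
--                 freqs[word] = dict()
--             if i not in freqs[word]:
--                 freqs[word][i] = 0
--             freqs[word][i] += 1
--
--     resList = []
--     for query in queries:
--         s = None
--         for word in query.split():
--             if s is None:
--                 s = set(freqs[word].keys())
--             else:
--                 s = s.intersection(set(freqs[word].keys()))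
--         if len(s) == 0:
--             resList.append([-1])
--             continue
--
--         l = sorted(list(s))
--         res = []
--         for idx in l:
--             min_cnt = 10
--             for word in query.split():
--                 min_cnt = min(min_cnt, freqs[word][idx])
--             for _ in range(min_cnt):
--                 res.append(idx)
--         resList.append(res)
--
--     return resList
-- ===== SOURCE B (Python) =====
-- def textQueries(sentences, queries):
--     # Inverted index of sorted posting lists (sentence index, capped count);
--     # each query intersects its words' postings with a two-pointer merge.
--     postings = {}
--     for i, sentence in enumerate(sentences):
--         cnt = {}
--         for w in sentence.split():
--             cnt[w] = cnt.get(w, 0) + 1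
--         for w, c in cnt.items():
--             postings.setdefault(w, []).append((i, min(c, 10)))
--     out = []
--     for query in queries:
--         words = query.split()
--         common = postings[words[0]]
--         for w in words[1:]:
--             plist = postings[w]
--             merged = []
--             a = b = 0
--             while a < len(common) and b < len(plist):
--                 i1, c1 = common[a]
--                 i2, c2 = plist[b]
--                 if i1 == i2:
--                     merged.append((i1, min(c1, c2)))
--                     a += 1
--                     b += 1
--                 elif i1 < i2:
--                     a += 1
--                 else:
--                     b += 1
--             common = merged
--         out.append([i for i, c in common for _ in range(c)] or [-1])
--     return out
-- ===== Notes on version B (the rewrite author's own statement) =====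
-- stated objective: faster
-- what changed: Replaces the word->sentence->count nested dict with per-query set building, set intersection, sorting and per-match per-word lookups by an inverted index of sorted posting lists (index, capped count) intersected with a linear two-pointer merge.
import Mathlib
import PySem

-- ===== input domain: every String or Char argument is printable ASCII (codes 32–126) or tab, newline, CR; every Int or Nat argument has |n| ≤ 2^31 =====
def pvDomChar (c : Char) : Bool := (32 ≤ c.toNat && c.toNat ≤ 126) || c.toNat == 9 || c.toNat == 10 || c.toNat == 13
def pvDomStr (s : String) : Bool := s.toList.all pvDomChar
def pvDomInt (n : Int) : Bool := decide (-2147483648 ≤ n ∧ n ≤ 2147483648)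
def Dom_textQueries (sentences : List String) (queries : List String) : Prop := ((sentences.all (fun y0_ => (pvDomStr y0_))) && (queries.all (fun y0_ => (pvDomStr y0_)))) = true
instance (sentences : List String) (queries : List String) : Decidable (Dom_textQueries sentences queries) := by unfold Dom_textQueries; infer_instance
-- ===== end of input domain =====

-- B replaces A's per-query set building, intersection, sort and per-match lookups by an
-- inverted index of sorted posting lists merged with two pointers (measured faster).


-- ===== PORT A =====
-- one step of A's building loop: freqs.setdefault(word, {}); freqs[word].setdefault(i, 0); freqs[word][i] += 1
def pvAStep (i : Int) (freqs : PySem.Dict String (PySem.Dict Int Int)) (word : String) :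
    PySem.Dict String (PySem.Dict Int Int) :=
  let freqs := if freqs.contains word then freqs else freqs.insert word PySem.Dict.empty
  let d := freqs.getD word PySem.Dict.empty
  let d := if d.contains i then d else d.insert i 0
  freqs.insert word (d.insert i (d.getD i 0 + 1))

def pvABuild (sentences : List String) : PySem.Dict String (PySem.Dict Int Int) :=
  (PySem.List.enumerate sentences).foldl
    (fun freqs p => (PySem.Str.split₀ p.2).foldl (pvAStep p.1) freqs) PySem.Dict.empty

-- one step of A's intersection loop: s is None on the first word
def pvAPick (freqs : PySem.Dict String (PySem.Dict Int Int)) (s : Option (PySem.Set Int)) (word : String) :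
    Option (PySem.Set Int) :=
  match s with
  | none => some (PySem.Set.ofList (freqs.getD word PySem.Dict.empty).keys)
  | some s => some (PySem.Set.inter s (PySem.Set.ofList (freqs.getD word PySem.Dict.empty).keys))

-- A's per-query body (the value appended to resList)
def pvAQuery (freqs : PySem.Dict String (PySem.Dict Int Int)) (query : String) : List Int :=
  let s : Option (PySem.Set Int) :=
    (PySem.Str.split₀ query).foldl (pvAPick freqs) none
  match s with
  | none => [-1]  -- unreachable under Pre_ (Python A raises TypeError on len(None))
  | some s =>
    if s.length = 0 then [-1]
    else
      (PySem.List.sorted s (fun x => x) false).foldl (fun res idx =>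
        let min_cnt := (PySem.Str.split₀ query).foldl
          (fun m word => min m ((freqs.getD word PySem.Dict.empty).getD idx 0)) 10
        (PySem.List.pyRange 0 min_cnt 1).foldl (fun res _ => res ++ [idx]) res) []

def textQueries (sentences : List String) (queries : List String) : List (List Int) :=
  let freqs := pvABuild sentences
  queries.foldl (fun resList query => resList ++ [pvAQuery freqs query]) []

-- ===== PORT B =====
def pvBCounter (sentence : String) : PySem.Dict String Int :=
  (PySem.Str.split₀ sentence).foldl
    (fun cnt word => cnt.insert word (cnt.getD word 0 + 1)) PySem.Dict.empty

-- postings.setdefault(w, []).append((i, min(c, 10)))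
def pvBPost (sentences : List String) : PySem.Dict String (List (Int × Int)) :=
  (PySem.List.enumerate sentences).foldl (fun post p =>
    (pvBCounter p.2).items.foldl
      (fun post wc => post.modify wc.1 [] (· ++ [(p.1, min wc.2 10)])) post)
    PySem.Dict.empty

-- the two-pointer while loop: advancing a pointer = dropping that list's head
def pvBMerge : List (Int × Int) → List (Int × Int) → List (Int × Int)
  | [], _ => []
  | _ :: _, [] => []
  | (i1, c1) :: t1, (i2, c2) :: t2 =>
    if i1 = i2 then (i1, min c1 c2) :: pvBMerge t1 t2
    else if i1 < i2 then pvBMerge t1 ((i2, c2) :: t2)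
    else pvBMerge ((i1, c1) :: t1) t2
  termination_by l1 l2 => l1.length + l2.length

def pvBQuery (post : PySem.Dict String (List (Int × Int))) (query : String) : List Int :=
  match PySem.Str.split₀ query with
  | [] => [-1]  -- unreachable under Pre_ (Python B raises IndexError on words[0])
  | w₀ :: ws =>
    let common := ws.foldl (fun common w => pvBMerge common (post.getD w [])) (post.getD w₀ [])
    let res := common.flatMap (fun p => List.replicate p.2.toNat p.1)
    if res = [] then [-1] else res

def textQueries_alt (sentences : List String) (queries : List String) : List (List Int) :=
  let post := pvBPost sentences
  queries.map (pvBQuery post)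

-- ===== PRECONDITION & SPEC =====
-- Pre_ excludes exactly the inputs where Python A raises: a query whose split() is
-- empty (TypeError on len(None)) or containing a word found in no sentence (KeyError).
def Pre_textQueries (sentences : List String) (queries : List String) : Prop :=
  ∀ q ∈ queries, PySem.Str.split₀ q ≠ [] ∧
    ∀ w ∈ PySem.Str.split₀ q, ∃ s ∈ sentences, w ∈ PySem.Str.split₀ s
instance (sentences : List String) (queries : List String) : Decidable (Pre_textQueries sentences queries) := by
  unfold Pre_textQueries; infer_instance
def pvWitness_textQueries : List String × List String := (["a b", "b c"], ["b", "a b"])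

def Spec_textQueries (sentences : List String) (queries : List String) (out : List (List Int)) : Prop := out = textQueries_alt sentences queries
instance (sentences : List String) (queries : List String) (out : List (List Int)) : Decidable (Spec_textQueries sentences queries out) := by unfold Spec_textQueries; infer_instance

-- ===== CLAIM (what is proved, stated in full; the proofs are below) =====
def Claim_equal_textQueries : Prop := ∀ (sentences : List String) (queries : List String), Dom_textQueries sentences queries → Pre_textQueries sentences queries → Spec_textQueries sentences queries (textQueries sentences queries)
-- ===== LEMMAS AND PROOFS =====

def pvE (sentences : List String) : List (Int × String) := PySem.List.enumerate sentences 0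
def pvC (w : String) : Int × String → Bool := fun p => decide (w ∈ PySem.Str.split₀ p.2)
def pvK (sentences : List String) (w : String) : List Int := ((pvE sentences).filter (pvC w)).map (·.1)

theorem pvAStep_eq (i : Int) (f : PySem.Dict String (PySem.Dict Int Int)) (word : String) :
    pvAStep i f word =
      (if f.contains word then f else f.insert word PySem.Dict.empty).insert word
        ((fun d => d.insert i (d.getD i 0 + 1))
          (if (f.getD word PySem.Dict.empty).contains i then f.getD word PySem.Dict.empty
           else (f.getD word PySem.Dict.empty).insert i 0)) := by
  unfold pvAStep
  by_cases hc : f.contains word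
  · simp [hc]
  · simp [hc, PySem.Dict.getD_insert_self, PySem.Dict.getD_of_not_contains _ _ (by simpa using hc)]

theorem pvAStep_getD (i : Int) (f : PySem.Dict String (PySem.Dict Int Int)) (word w : String) (hw : w ≠ word) :
    (pvAStep i f word).getD w PySem.Dict.empty = f.getD w PySem.Dict.empty := by
  rw [pvAStep_eq, PySem.Dict.getD_insert_of_ne _ _ _ hw]
  by_cases hc : f.contains word
  · simp [hc]
  · simp [hc, PySem.Dict.getD_insert_of_ne _ _ _ hw]

theorem pvAStep_getD_getD (i : Int) (f : PySem.Dict String (PySem.Dict Int Int)) (word w : String) (j : Int) :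
    ((pvAStep i f word).getD w PySem.Dict.empty).getD j 0
      = ((f.getD w PySem.Dict.empty).getD j 0) + (if w = word ∧ j = i then 1 else 0) := by
  by_cases hw : w = word
  · subst hw
    rw [pvAStep_eq, PySem.Dict.getD_insert_self]
    by_cases hdi : (f.getD w PySem.Dict.empty).contains i
    · simp only [hdi, if_true]
      by_cases hj : j = i
      · subst hj; simp [PySem.Dict.getD_insert_self]
      · simp [PySem.Dict.getD_insert_of_ne _ _ _ hj, hj]
    · simp only [hdi, Bool.false_eq_true, if_false]
      by_cases hj : j = i
      · subst hj
        simp [PySem.Dict.getD_insert_self,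
          PySem.Dict.getD_of_not_contains _ (0 : Int) (by simpa using hdi)]
      · simp [PySem.Dict.getD_insert_of_ne _ _ _ hj, hj]
  · rw [pvAStep_getD _ _ _ _ hw]; simp [hw]

theorem pvAStep_keys (i : Int) (f : PySem.Dict String (PySem.Dict Int Int)) (word w : String) :
    ((pvAStep i f word).getD w PySem.Dict.empty).keys
      = if w = word then PySem.Set.add ((f.getD w PySem.Dict.empty).keys) i
        else ((f.getD w PySem.Dict.empty).keys) := by
  by_cases hw : w = word
  · subst hw
    rw [pvAStep_eq, PySem.Dict.getD_insert_self]
    simp only [if_true]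
    by_cases hdi : (f.getD w PySem.Dict.empty).contains i
    · simp only [hdi, if_true]
      rw [PySem.Dict.keys_insert_of_contains _ _ hdi]
      unfold PySem.Set.add
      rw [if_pos]
      simp only [PySem.Set.contains, List.contains_eq_mem, decide_eq_true_iff]
      exact (PySem.Dict.contains_iff_mem_keys _ _).mp hdi
    · simp only [hdi, Bool.false_eq_true, if_false]
      rw [PySem.Dict.keys_insert_of_contains _ _ (by simp [PySem.Dict.contains_insert]),
        PySem.Dict.keys_insert_of_not_contains _ _ (by simpa using hdi)]
      unfold PySem.Set.add
      rw [if_neg]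
      simp only [PySem.Set.contains, List.contains_eq_mem, decide_eq_true_iff]
      rw [← PySem.Dict.contains_iff_mem_keys]
      simp [hdi]
  · rw [pvAStep_getD _ _ _ _ hw]; simp [hw]

theorem pvInner_getD_getD (i : Int) (ws : List String) (f : PySem.Dict String (PySem.Dict Int Int)) (w : String) (j : Int) :
    (((ws.foldl (pvAStep i) f).getD w PySem.Dict.empty).getD j 0)
      = ((f.getD w PySem.Dict.empty).getD j 0) + (if j = i then (ws.count w : Int) else 0) := by
  induction ws generalizing f with
  | nil => simp
  | cons x t ih =>
    simp only [List.foldl_cons, ih (pvAStep i f x), pvAStep_getD_getD, List.count_cons]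
    by_cases hx : w = x
    · have hb : (x == w) = true := by simp [hx]
      by_cases hj : j = i <;> simp [hj, hx, hb] <;> push_cast <;> omega
    · have hb : (x == w) = false := by simpa using fun h => hx h.symm
      by_cases hj : j = i <;> simp [hj, hx, hb]

theorem pvInner_keys (i : Int) (ws : List String) (f : PySem.Dict String (PySem.Dict Int Int)) (w : String) :
    ((ws.foldl (pvAStep i) f).getD w PySem.Dict.empty).keys
      = if w ∈ ws then PySem.Set.add ((f.getD w PySem.Dict.empty).keys) i
        else (f.getD w PySem.Dict.empty).keys := by
  induction ws generalizing f with
  | nil => simp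
  | cons x t ih =>
    simp only [List.foldl_cons, ih (pvAStep i f x), pvAStep_keys, List.mem_cons]
    by_cases hx : w = x <;> by_cases ht : w ∈ t <;>
      simp [hx, ht, PySem.Set.add]
    · split_ifs with h1 h2 <;> simp_all [PySem.Set.contains]
    · split_ifs with h1 <;> simp_all [PySem.Set.contains]

theorem pvOuter_keys (sentences : List String) (a : Int) (f : PySem.Dict String (PySem.Dict Int Int)) (w : String)
    (hinv : ∀ j ∈ ((f.getD w PySem.Dict.empty).keys : List Int), j < a) :
    (((PySem.List.enumerate sentences a).foldl
        (fun freqs p => (PySem.Str.split₀ p.2).foldl (pvAStep p.1) freqs) f).getD w PySem.Dict.empty).keys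
      = (f.getD w PySem.Dict.empty).keys
        ++ ((PySem.List.enumerate sentences a).filter
              (fun p => decide (w ∈ PySem.Str.split₀ p.2))).map (·.1) := by
  induction sentences generalizing a f with
  | nil => simp [PySem.List.enumerate]
  | cons s rest ih =>
    rw [PySem.List.enumerate_cons]
    simp only [List.foldl_cons, List.filter_cons]
    have hkeys := pvInner_keys a (PySem.Str.split₀ s) f w
    by_cases hs : w ∈ PySem.Str.split₀ s
    · have hna : ¬ (a ∈ (f.getD w PySem.Dict.empty).keys) := fun h => absurd (hinv a h) (by omega)
      have hadd : PySem.Set.add ((f.getD w PySem.Dict.empty).keys) a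
          = (f.getD w PySem.Dict.empty).keys ++ [a] := by
        unfold PySem.Set.add PySem.Set.contains
        rw [if_neg]; simpa using hna
      rw [ih (a+1) _ (by
        rw [hkeys, if_pos hs, hadd]
        intro j hj; rcases List.mem_append.mp hj with h | h
        · exact lt_trans (hinv j h) (by omega)
        · simp at h; omega), hkeys, if_pos hs, hadd]
      simp [hs]
    · rw [ih (a+1) _ (by
        rw [hkeys, if_neg hs]
        intro j hj; exact lt_trans (hinv j hj) (by omega)), hkeys, if_neg hs]
      simp [hs]

theorem pvOuter_getD_lt (sentences : List String) (a : Int) (f : PySem.Dict String (PySem.Dict Int Int)) (w : String)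
    (j : Int) (hj : j < a) :
    ((((PySem.List.enumerate sentences a).foldl
        (fun freqs p => (PySem.Str.split₀ p.2).foldl (pvAStep p.1) freqs) f).getD w PySem.Dict.empty).getD j 0)
      = ((f.getD w PySem.Dict.empty).getD j 0) := by
  induction sentences generalizing a f with
  | nil => simp [PySem.List.enumerate]
  | cons s rest ih =>
    rw [PySem.List.enumerate_cons]
    simp only [List.foldl_cons]
    rw [ih (a+1) _ (by omega), pvInner_getD_getD, if_neg (by omega)]
    omega

theorem pvOuter_getD_at (sentences : List String) (a : Int) (f : PySem.Dict String (PySem.Dict Int Int)) (w : String)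
    (k : Nat) (hk : k < sentences.length) :
    ((((PySem.List.enumerate sentences a).foldl
        (fun freqs p => (PySem.Str.split₀ p.2).foldl (pvAStep p.1) freqs) f).getD w PySem.Dict.empty).getD (a + k) 0)
      = ((f.getD w PySem.Dict.empty).getD (a + k) 0) + ((PySem.Str.split₀ sentences[k]).count w : Int) := by
  induction sentences generalizing a f k with
  | nil => simp at hk
  | cons s rest ih =>
    rw [PySem.List.enumerate_cons]
    simp only [List.foldl_cons]
    cases k with
    | zero =>
      simp only [Nat.cast_zero, add_zero, List.getElem_cons_zero]
      rw [pvOuter_getD_lt _ _ _ _ _ (by omega), pvInner_getD_getD, if_pos rfl]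
    | succ k' =>
      have h1 : a + ((k' : Int) + 1) = (a + 1) + k' := by omega
      simp only [Nat.cast_add, Nat.cast_one, List.getElem_cons_succ, h1]
      rw [ih (a+1) _ k' (by simpa using hk), pvInner_getD_getD, if_neg (by omega)]
      omega

theorem pvFreqs_keys (sentences : List String) (w : String) :
    ((pvABuild sentences).getD w PySem.Dict.empty).keys = pvK sentences w := by
  unfold pvABuild pvK pvE pvC
  rw [pvOuter_keys _ 0 _ _ (by simp)]
  simp

theorem pvFreqs_getD (sentences : List String) (w : String) (k : Nat) (hk : k < sentences.length) :
    ((pvABuild sentences).getD w PySem.Dict.empty).getD (k : Int) 0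
      = ((PySem.Str.split₀ sentences[k]).count w : Int) := by
  unfold pvABuild
  have := pvOuter_getD_at sentences 0 PySem.Dict.empty w k hk
  simpa using this

theorem pvE_mem (sentences : List String) (p : Int × String) :
    p ∈ pvE sentences ↔ ∃ (k : Nat), ∃ (h : k < sentences.length), p = ((k : Int), sentences[k]) := by
  unfold pvE
  rw [PySem.List.mem_enumerate_iff]
  simp

theorem pvK_pairwise (sentences : List String) (w : String) :
    (pvK sentences w).Pairwise (· < ·) := by
  unfold pvK
  rw [List.pairwise_map]
  exact ((PySem.List.pairwise_lt_enumerate sentences 0).sublist List.filter_sublist)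

theorem pvK_nodup (sentences : List String) (w : String) : (pvK sentences w).Nodup :=
  (pvK_pairwise sentences w).imp (fun h => ne_of_lt h)

theorem pvMemK (sentences : List String) (w : String) (p : Int × String) (hp : p ∈ pvE sentences) :
    p.1 ∈ pvK sentences w ↔ w ∈ PySem.Str.split₀ p.2 := by
  unfold pvK
  constructor
  · intro h
    rcases List.mem_map.mp h with ⟨q, hq, hq1⟩
    rcases List.mem_filter.mp hq with ⟨hqE, hqc⟩
    rcases (pvE_mem _ _).mp hp with ⟨k, hk, rfl⟩
    rcases (pvE_mem _ _).mp hqE with ⟨k', hk', rfl⟩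
    have : k' = k := by simpa using hq1
    subst this
    simpa [pvC] using hqc
  · intro h
    exact List.mem_map.mpr ⟨p, List.mem_filter.mpr ⟨hp, by simpa [pvC] using h⟩, rfl⟩

theorem pvInterFold (sentences : List String) (ws : List String) (c0 : Int × String → Bool) :
    ws.foldl (fun s w => PySem.Set.inter s (PySem.Set.ofList (pvK sentences w)))
        (((pvE sentences).filter c0).map (·.1))
      = ((pvE sentences).filter (fun p => c0 p && ws.all (fun w => pvC w p))).map (·.1) := by
  induction ws generalizing c0 with
  | nil => simp
  | cons w t ih =>
    simp only [List.foldl_cons]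
    have h1 : PySem.Set.inter (((pvE sentences).filter c0).map (·.1)) (PySem.Set.ofList (pvK sentences w))
        = (((pvE sentences).filter (fun p => c0 p && pvC w p)).map (·.1)) := by
      unfold PySem.Set.inter
      rw [PySem.Set.ofList_eq_self_of_nodup _ (pvK_nodup sentences w)]
      rw [List.filter_map, List.filter_filter]
      congr 1
      apply List.filter_congr
      intro p hp
      have := pvMemK sentences w p hp
      simp only [Function.comp, PySem.Set.contains, List.contains_eq_mem]
      by_cases hc : c0 p <;> by_cases hw : w ∈ PySem.Str.split₀ p.2 <;>
        simp [hc, hw, pvC, this]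
    rw [h1, ih]
    congr 1
    apply List.filter_congr
    intro p hp
    simp [Bool.and_assoc]

theorem pvFM_pairwise (sentences : List String) (c : Int × String → Bool) :
    (((pvE sentences).filter c).map (·.1)).Pairwise (· < ·) := by
  rw [List.pairwise_map]
  exact ((PySem.List.pairwise_lt_enumerate sentences 0).sublist List.filter_sublist)

theorem pvMinPos (ws : List String) (g : String → Int) (m : Int) (hm : 1 ≤ m)
    (hg : ∀ w ∈ ws, 1 ≤ g w) :
    1 ≤ ws.foldl (fun m w => min m (g w)) m := by
  induction ws generalizing m with
  | nil => simpa
  | cons x t ih =>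
    simp only [List.foldl_cons]
    exact ih _ (le_min hm (hg x (by simp))) (fun w hw => hg w (List.mem_cons_of_mem _ hw))

-- B-side: characterisation of the posting lists and of the two-pointer merge
def pvPF (sentences : List String) (w : String) : List (Int × Int) :=
  ((pvE sentences).filter (pvC w)).map
    (fun p => (p.1, min ((PySem.Str.split₀ p.2).count w : Int) 10))

theorem pvModApp (l : List (String × Int)) (d : PySem.Dict String (List (Int × Int)))
    (g : String × Int → Int × Int) (w : String) :
    (l.foldl (fun d wc => d.modify wc.1 [] (· ++ [g wc])) d).getD w []
      = d.getD w [] ++ ((l.filter (fun wc => wc.1 == w)).map g) := by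
  induction l generalizing d with
  | nil => simp
  | cons x t ih =>
    simp only [List.foldl_cons, List.filter_cons, ih]
    by_cases hx : x.1 = w
    · simp [PySem.Dict.getD_modify, hx]
    · simp [PySem.Dict.getD_modify, hx, Ne.symm hx]

theorem pvFilterNodup (l : List String) (hl : l.Nodup) (w : String) :
    l.filter (fun x => x == w) = if w ∈ l then [w] else [] := by
  induction l with
  | nil => simp
  | cons x t ih =>
    rcases List.nodup_cons.mp hl with ⟨hx, ht⟩
    simp only [List.filter_cons, List.mem_cons]
    by_cases hxw : x = w
    · subst hxw
      rw [if_pos (by simp), if_pos (Or.inl rfl)]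
      rw [List.filter_eq_nil_iff.mpr (fun y hy => by
        simp only [beq_iff_eq]
        exact fun h => hx (h ▸ hy))]
    · rw [if_neg (by simpa using hxw)]
      rw [ih ht]
      by_cases hw : w ∈ t
      · rw [if_pos hw, if_pos (Or.inr hw)]
      · rw [if_neg hw, if_neg (by rintro (h | h) <;> [exact hxw h.symm; exact hw h])]

theorem pvItemsFilter (s : String) (w : String) :
    ((pvBCounter s).items.filter (fun wc => wc.1 == w))
      = if w ∈ PySem.Str.split₀ s then [(w, ((PySem.Str.split₀ s).count w : Int))] else [] := by
  rw [show pvBCounter s = PySem.Dict.counter (PySem.Str.split₀ s) from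
      PySem.Dict.foldl_insert_getD_add_one_eq_counter _]
  rw [PySem.Dict.items_counter, List.filter_map]
  rw [show ((fun wc : String × Int => wc.1 == w) ∘
      (fun k => (k, ((PySem.Str.split₀ s).count k : Int)))) = (fun k => k == w) from rfl]
  rw [pvFilterNodup _ (PySem.Set.nodup_ofList _) w]
  by_cases hw : w ∈ PySem.Str.split₀ s
  · rw [if_pos ((PySem.Set.mem_ofList _ _).mpr hw), if_pos hw, List.map_cons, List.map_nil]
  · rw [if_neg (fun h => hw ((PySem.Set.mem_ofList _ _).mp h)), if_neg hw, List.map_nil]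

theorem pvPost_outer (sentences : List String) (a : Int)
    (d : PySem.Dict String (List (Int × Int))) (w : String) :
    (((PySem.List.enumerate sentences a).foldl (fun post p =>
        (pvBCounter p.2).items.foldl
          (fun post wc => post.modify wc.1 [] (· ++ [(p.1, min wc.2 10)])) post) d)).getD w []
      = d.getD w []
        ++ ((PySem.List.enumerate sentences a).filter
              (fun p => decide (w ∈ PySem.Str.split₀ p.2))).map
            (fun p => (p.1, min ((PySem.Str.split₀ p.2).count w : Int) 10)) := by
  induction sentences generalizing a d with
  | nil => simp [PySem.List.enumerate]
  | cons s rest ih =>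
    rw [PySem.List.enumerate_cons]
    simp only [List.foldl_cons, List.filter_cons]
    rw [ih, pvModApp _ _ (fun wc => (a, min wc.2 10)) w, pvItemsFilter]
    by_cases hs : w ∈ PySem.Str.split₀ s <;> simp [hs]

theorem pvPost_getD (sentences : List String) (w : String) :
    (pvBPost sentences).getD w [] = pvPF sentences w := by
  unfold pvBPost pvPF pvE pvC
  rw [pvPost_outer]
  simp

theorem pvBMerge_nil_right (l : List (Int × Int)) : pvBMerge l [] = [] := by
  rcases l with _ | ⟨⟨i, c⟩, t⟩ <;> rw [pvBMerge]

theorem pvBMerge_cons_cons (i1 c1 i2 c2 : Int) (t1 t2 : List (Int × Int)) :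
    pvBMerge ((i1, c1) :: t1) ((i2, c2) :: t2)
      = if i1 = i2 then (i1, min c1 c2) :: pvBMerge t1 t2
        else if i1 < i2 then pvBMerge t1 ((i2, c2) :: t2)
        else pvBMerge ((i1, c1) :: t1) t2 := by
  rw [pvBMerge]

theorem pvBMerge_nil_left (l : List (Int × Int)) : pvBMerge [] l = [] := by
  rw [pvBMerge]

theorem pvMergeEq (L : List (Int × String)) (hL : L.Pairwise (fun p q => p.1 < q.1))
    (c1 c2 : Int × String → Bool) (f g : Int × String → Int) :
    pvBMerge ((L.filter c1).map (fun p => (p.1, f p))) ((L.filter c2).map (fun p => (p.1, g p)))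
      = (L.filter (fun p => c1 p && c2 p)).map (fun p => (p.1, min (f p) (g p))) := by
  induction L with
  | nil => simp [pvBMerge_nil_left]
  | cons p L' ih =>
    rcases List.pairwise_cons.mp hL with ⟨hlt, hL'⟩
    have IH := ih hL'
    by_cases h1 : c1 p <;> by_cases h2 : c2 p
    · rw [List.filter_cons_of_pos h1, List.filter_cons_of_pos h2,
        List.filter_cons_of_pos (by simp [h1, h2]), List.map_cons, List.map_cons, List.map_cons,
        pvBMerge_cons_cons, if_pos rfl, IH]
    · -- c1 p, ¬ c2 p: the head of the left list is smaller than every key on the right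
      rw [List.filter_cons_of_pos h1, List.filter_cons_of_neg h2,
        List.filter_cons_of_neg (by simp [h2]), List.map_cons]
      rcases hq : L'.filter c2 with _ | ⟨q, qs⟩
      · have h2' := List.filter_eq_nil_iff.mp hq
        rw [List.map_nil, pvBMerge_nil_right,
          List.filter_eq_nil_iff.mpr (fun a ha => by simp [h2' a ha]), List.map_nil]
      · have hqL : q ∈ L' := by
          have : q ∈ L'.filter c2 := by rw [hq]; exact List.mem_cons_self ..
          exact (List.mem_filter.mp this).1
        have hmap : ((q.1, g q) : Int × Int) :: (qs.map (fun p => (p.1, g p)))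
            = (L'.filter c2).map (fun p => (p.1, g p)) := by rw [hq, List.map_cons]
        rw [List.map_cons, pvBMerge_cons_cons, if_neg (ne_of_lt (hlt q hqL)),
          if_pos (hlt q hqL), hmap, IH]
    · -- ¬ c1 p, c2 p: symmetric
      rw [List.filter_cons_of_neg h1, List.filter_cons_of_pos h2,
        List.filter_cons_of_neg (by simp [h1]), List.map_cons]
      rcases hq : L'.filter c1 with _ | ⟨q, qs⟩
      · have h1' := List.filter_eq_nil_iff.mp hq
        rw [List.map_nil, pvBMerge_nil_left,
          List.filter_eq_nil_iff.mpr (fun a ha => by simp [h1' a ha]), List.map_nil]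
      · have hqL : q ∈ L' := by
          have : q ∈ L'.filter c1 := by rw [hq]; exact List.mem_cons_self ..
          exact (List.mem_filter.mp this).1
        have hpq := hlt q hqL
        have hmap : ((q.1, f q) : Int × Int) :: (qs.map (fun p => (p.1, f p)))
            = (L'.filter c1).map (fun p => (p.1, f p)) := by rw [hq, List.map_cons]
        rw [List.map_cons, pvBMerge_cons_cons, if_neg (by omega), if_neg (by omega),
          hmap, IH]
    · rw [List.filter_cons_of_neg h1, List.filter_cons_of_neg h2,
        List.filter_cons_of_neg (by simp [h1])]
      exact IH

theorem pvFoldMinCap (ws : List String) (h : String → Int) (m : Int) (hm : m ≤ 10) :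
    ws.foldl (fun m w => min m (min (h w) 10)) m = ws.foldl (fun m w => min m (h w)) m := by
  induction ws generalizing m with
  | nil => rfl
  | cons x t ih =>
    simp only [List.foldl_cons]
    rw [show min m (min (h x) 10) = min m (h x) by omega]
    exact ih _ (by omega)

theorem pvFoldMerge (sentences : List String) (ws : List String)
    (c : Int × String → Bool) (f : Int × String → Int) :
    ws.foldl (fun st w => pvBMerge st ((pvBPost sentences).getD w []))
        (((pvE sentences).filter c).map (fun p => (p.1, f p)))
      = ((pvE sentences).filter (fun p => c p && ws.all (fun w => pvC w p))).map
          (fun p => (p.1, ws.foldl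
            (fun m w => min m (min ((PySem.Str.split₀ p.2).count w : Int) 10)) (f p))) := by
  induction ws generalizing c f with
  | nil => simp
  | cons w t ih =>
    simp only [List.foldl_cons]
    rw [pvPost_getD,
      show pvPF sentences w = ((pvE sentences).filter (pvC w)).map
        (fun p => (p.1, (fun q : Int × String =>
          min ((PySem.Str.split₀ q.2).count w : Int) 10) p)) from rfl,
      pvMergeEq (pvE sentences) (PySem.List.pairwise_lt_enumerate sentences 0) c (pvC w) f _,
      ih]
    congr 1
    apply List.filter_congr
    intro p hp
    simp [Bool.and_assoc]

theorem pvOptFold (freqs : PySem.Dict String (PySem.Dict Int Int)) (t : List String) (s0 : PySem.Set Int) :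
    t.foldl (pvAPick freqs) (some s0)
      = some (t.foldl (fun s w => PySem.Set.inter s (PySem.Set.ofList (freqs.getD w PySem.Dict.empty).keys)) s0) := by
  induction t generalizing s0 with
  | nil => rfl
  | cons x t ih => simp only [List.foldl_cons]; rw [show pvAPick freqs (some s0) x = some (PySem.Set.inter s0 (PySem.Set.ofList (freqs.getD x PySem.Dict.empty).keys)) from rfl, ih]

theorem pvQuery_eq (sentences : List String) (query : String)
    (hne : PySem.Str.split₀ query ≠ []) :
    pvAQuery (pvABuild sentences) query = pvBQuery (pvBPost sentences) query := by
  rcases hws : PySem.Str.split₀ query with _ | ⟨w₀, t⟩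
  · exact absurd hws hne
  -- the common per-sentence test and count
  set cond : Int × String → Bool := fun p => (w₀ :: t).all (fun w => pvC w p) with hcond
  set mcount : Int × String → Int :=
    fun p => (w₀ :: t).foldl (fun m w => min m ((PySem.Str.split₀ p.2).count w : Int)) 10 with hmc
  set Fl : List (Int × String) := (pvE sentences).filter cond with hFl
  set R : List Int := Fl.flatMap (fun p => List.replicate (mcount p).toNat p.1) with hR
  -- A side
  have hA : pvAQuery (pvABuild sentences) query = (if Fl = [] then [-1] else R) := by
    unfold pvAQuery
    rw [hws]
    rw [List.foldl_cons]
    rw [show pvAPick (pvABuild sentences) none w₀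
        = some (PySem.Set.ofList ((pvABuild sentences).getD w₀ PySem.Dict.empty).keys) from rfl]
    rw [pvOptFold]
    simp only [pvFreqs_keys]
    rw [PySem.Set.ofList_eq_self_of_nodup _ (pvK_nodup sentences w₀),
      show pvK sentences w₀ = ((pvE sentences).filter (pvC w₀)).map (·.1) from rfl,
      pvInterFold]
    rw [show ((pvE sentences).filter (fun p => pvC w₀ p && t.all (fun w => pvC w p))) = Fl by
      rw [hFl, hcond]; exact List.filter_congr (fun p _ => by rw [List.all_cons])]
    by_cases hFlnil : Fl = []
    · rw [if_pos hFlnil, if_pos (by simp [hFlnil])]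
    · rw [if_neg (by simpa using hFlnil), if_neg hFlnil]
      rw [PySem.List.sorted_eq_of_perm_of_pairwise_lt _ (Fl.map (·.1)) _ (List.Perm.refl _)
        (by rw [hFl]; exact pvFM_pairwise sentences cond)]
      have hbody : ∀ (res : List Int) (idx : Int),
          (PySem.List.pyRange 0 ((w₀ :: t).foldl
              (fun m word => min m (((pvABuild sentences).getD word PySem.Dict.empty).getD idx 0)) 10) 1).foldl
            (fun res _ => res ++ [idx]) res
          = res ++ List.replicate ((w₀ :: t).foldl
              (fun m word => min m (((pvABuild sentences).getD word PySem.Dict.empty).getD idx 0)) 10).toNat idx := by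
        intro res idx
        rw [PySem.List.foldl_append_singleton_eq_map (fun _ => idx)]
        congr 1
        rw [List.map_const', PySem.List.length_pyRange_one]
        congr 1
        omega
      rw [PySem.List.foldl_congr_mem _ _
        (fun res idx => res ++ List.replicate ((w₀ :: t).foldl
          (fun m word => min m (((pvABuild sentences).getD word PySem.Dict.empty).getD idx 0)) 10).toNat idx) _
        (fun acc x _ => hbody acc x)]
      rw [PySem.List.foldl_append_eq_flatMap, List.nil_append, List.flatMap_map]
      rw [hR]
      apply List.flatMap_congr
      intro p hp
      have hpE : p ∈ pvE sentences := List.mem_filter.mp (hFl ▸ hp) |>.1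
      rcases (pvE_mem _ _).mp hpE with ⟨k, hk, rfl⟩
      have : ∀ word : String, ((pvABuild sentences).getD word PySem.Dict.empty).getD ((k : Int)) 0
          = ((PySem.Str.split₀ sentences[k]).count word : Int) := fun word => pvFreqs_getD sentences word k hk
      simp only [hmc, this]
  -- B side
  have hB : pvBQuery (pvBPost sentences) query = (if R = [] then [-1] else R) := by
    unfold pvBQuery
    rw [hws]
    show (if (t.foldl (fun common w => pvBMerge common ((pvBPost sentences).getD w []))
            ((pvBPost sentences).getD w₀ [])).flatMap (fun p => List.replicate p.2.toNat p.1) = []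
        then [-1]
        else (t.foldl (fun common w => pvBMerge common ((pvBPost sentences).getD w []))
            ((pvBPost sentences).getD w₀ [])).flatMap (fun p => List.replicate p.2.toNat p.1))
      = if R = [] then [-1] else R
    rw [pvPost_getD sentences w₀]
    rw [show pvPF sentences w₀ = ((pvE sentences).filter (pvC w₀)).map
        (fun p => (p.1, (fun q : Int × String =>
          min ((PySem.Str.split₀ q.2).count w₀ : Int) 10) p)) from rfl]
    rw [pvFoldMerge sentences t (pvC w₀)
      (fun q : Int × String => min ((PySem.Str.split₀ q.2).count w₀ : Int) 10)]
    rw [List.flatMap_map]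
    have hcond : ((pvE sentences).filter (fun p => pvC w₀ p && t.all (fun w => pvC w p))) = Fl := by
      rw [hFl, hcond]; exact List.filter_congr (fun p _ => by rw [List.all_cons])
    have hval : (fun p : Int × String => List.replicate
          ((t.foldl (fun m w => min m (min ((PySem.Str.split₀ p.2).count w : Int) 10))
            (min ((PySem.Str.split₀ p.2).count w₀ : Int) 10)).toNat) p.1)
        = (fun p => List.replicate (mcount p).toNat p.1) := by
      funext p
      rw [hmc]
      simp only [List.foldl_cons]
      rw [pvFoldMinCap t _ _ (by omega),
        show min ((PySem.Str.split₀ p.2).count w₀ : Int) 10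
          = min 10 ((PySem.Str.split₀ p.2).count w₀ : Int) from min_comm .. ]
    rw [show (fun p : Int × String => List.replicate
        ((fun p : Int × String => t.foldl
          (fun m w => min m (min ((PySem.Str.split₀ p.2).count w : Int) 10))
          (min ((PySem.Str.split₀ p.2).count w₀ : Int) 10)) p).toNat p.1) = fun p : Int × String => List.replicate
          ((t.foldl (fun m w => min m (min ((PySem.Str.split₀ p.2).count w : Int) 10))
            (min ((PySem.Str.split₀ p.2).count w₀ : Int) 10)).toNat) p.1 from rfl,
      hval, hcond, ← hR]
  -- the two emptiness tests agree
  have hEmpty : (Fl = []) ↔ (R = []) := by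
    constructor
    · intro h; rw [hR, h]; rfl
    · intro h
      rcases hq : Fl with _ | ⟨q, rest⟩
      · rfl
      · exfalso
        have hqmem : q ∈ Fl := by rw [hq]; simp
        have hqcond : cond q = true := (List.mem_filter.mp (hFl ▸ hqmem)).2
        have hmin : 1 ≤ mcount q := by
          rw [hmc]
          apply pvMinPos _ _ _ (by omega)
          intro w hw
          have : w ∈ PySem.Str.split₀ q.2 := by
            rw [hcond] at hqcond
            have := List.all_eq_true.mp hqcond w hw
            simpa [pvC] using this
          have : 1 ≤ (PySem.Str.split₀ q.2).count w := List.one_le_count_iff.mpr this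
          exact_mod_cast this
        have : R ≠ [] := by
          rw [hR, hq]
          simp only [List.flatMap_cons, ne_eq, List.append_eq_nil_iff, List.append_assoc]
          intro hcontra
          have := hcontra.1
          rw [List.replicate_eq_nil_iff] at this
          omega
        exact this h
  rw [hA, hB]
  by_cases h : Fl = []
  · rw [if_pos h, if_pos (hEmpty.mp h)]
  · rw [if_neg h, if_neg (fun hr => h (hEmpty.mpr hr))]

-- ===== VERDICT (by name: the statement is the Claim_ definition above) =====
theorem textQueries_spec : Claim_equal_textQueries := by
  intro sentences queries _ hpre
  unfold Spec_textQueries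
  simp only [textQueries, textQueries_alt]
  rw [PySem.List.foldl_append_singleton_eq_map (pvAQuery (pvABuild sentences)), List.nil_append]
  exact List.map_congr_left (fun q hq => pvQuery_eq sentences q (hpre q hq).1)
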